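-- pv_equiv track=rewrite | github.com/tamasarker1434/ProcessMining | Assignments/AlphaMining.py | get_causality_parallel
-- ===== SOURCE A (Python) =====
-- def get_causality_parallel(d_succession):
--     causality = set()
--     parallel = set()
--     for i in d_succession:
--         a,b= i
--         if (a,b) and (b,a) in d_succession:
--             parallel.add((a,b))
--             parallel.add((b,a))
--         else:
--             causality.add((a, b))
--     return causality, parallel
-- ===== SOURCE B (Python) =====
-- def get_causality_parallel(d_succession):
--     # Group pairs by their unordered (canonical) endpoint pair; a group whose two
--     # orientations both occur (or a self-loop) is parallel, otherwise causal.
--     groups = {}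
--     for p in d_succession:
--         a, b = p
--         key = (a, b) if a <= b else (b, a)
--         if key not in groups:
--             groups[key] = (p, a == b)
--         elif groups[key][0] != p:
--             groups[key] = (groups[key][0], True)
--     causality = set()
--     parallel = set()
--     for first, both in groups.values():
--         if both:
--             parallel.add(first)
--             parallel.add((first[1], first[0]))
--         else:
--             causality.add(first)
--     return causality, parallel
-- ===== Notes on version B (the rewrite author's own statement) =====
-- stated objective: alternative
-- what changed: Instead of testing each pair's reverse against the whole list, B makes one dict pass grouping pairs under a canonical (sorted) endpoint key, recording each group's first orientation and a parallel flag, then emits causality/parallel per group.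
import Mathlib
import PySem

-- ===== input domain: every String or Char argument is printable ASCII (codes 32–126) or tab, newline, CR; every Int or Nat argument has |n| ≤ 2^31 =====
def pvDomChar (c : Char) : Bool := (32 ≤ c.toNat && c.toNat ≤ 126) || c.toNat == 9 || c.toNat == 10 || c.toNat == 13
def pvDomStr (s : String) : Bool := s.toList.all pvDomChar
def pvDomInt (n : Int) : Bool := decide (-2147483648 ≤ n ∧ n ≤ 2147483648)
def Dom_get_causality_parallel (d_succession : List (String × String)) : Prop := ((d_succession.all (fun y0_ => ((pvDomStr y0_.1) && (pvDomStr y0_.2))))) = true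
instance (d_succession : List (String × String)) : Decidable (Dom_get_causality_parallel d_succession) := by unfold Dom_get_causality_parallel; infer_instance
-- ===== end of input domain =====

-- B groups the pairs by their unordered endpoint pair in one dict pass instead of testing each pair's reverse against the whole list (alternative algorithm; same partition).


-- ===== PORT A =====
-- for i in d_succession: a,b = i; if (a,b) and (b,a) in d_succession: add both to parallel else add (a,b) to causality.
-- `(a,b) and X` : the nonempty tuple (a,b) is always truthy in Python, so the condition is exactly `(b,a) in d_succession`.
def get_causality_parallel (d_succession : List (String × String)) : (List (String × String)) × (List (String × String)) :=
  d_succession.foldl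
    (fun st i =>
      let a := i.1
      let b := i.2
      if d_succession.contains (b, a) then
        (st.1, PySem.Set.add (PySem.Set.add st.2 (a, b)) (b, a))
      else
        (PySem.Set.add st.1 (a, b), st.2))
    (PySem.Set.empty, PySem.Set.empty)

-- ===== PORT B =====
-- one dict pass grouping each pair under its canonical (sorted) endpoint pair, recording the first
-- orientation seen and whether a second orientation (or a self-loop) makes the group parallel;
-- then one pass over the groups emitting causality / parallel.
def get_causality_parallel_alt (d_succession : List (String × String)) : (List (String × String)) × (List (String × String)) :=
  let groups : PySem.Dict (String × String) ((String × String) × Bool) :=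
    d_succession.foldl
      (fun g p =>
        let key := if p.1 ≤ p.2 then p else (p.2, p.1)
        match PySem.Dict.get? g key with
        | none => PySem.Dict.insert g key (p, p.1 == p.2)
        | some fb => if fb.1 != p then PySem.Dict.insert g key (fb.1, true) else g)
      PySem.Dict.empty
  (PySem.Dict.values groups).foldl
    (fun st fb =>
      if fb.2 then (st.1, PySem.Set.add (PySem.Set.add st.2 fb.1) (fb.1.2, fb.1.1))
      else (PySem.Set.add st.1 fb.1, st.2))
    (PySem.Set.empty, PySem.Set.empty)

-- ===== PRECONDITION & SPEC =====
def Spec_get_causality_parallel (d_succession : List (String × String)) (out : (List (String × String)) × (List (String × String))) : Prop := out = get_causality_parallel_alt d_succession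
instance (d_succession : List (String × String)) (out : (List (String × String)) × (List (String × String))) : Decidable (Spec_get_causality_parallel d_succession out) := by unfold Spec_get_causality_parallel; infer_instance

-- ===== CLAIM (what is proved, stated in full; the proofs are below) =====
def Claim_equal_get_causality_parallel : Prop := ∀ (d_succession : List (String × String)), Dom_get_causality_parallel d_succession → Spec_get_causality_parallel d_succession (get_causality_parallel d_succession)

-- ===== LEMMAS AND PROOFS =====

-- abbreviations used only by the proofs
def prev (p : String × String) : String × String := (p.2, p.1)

def pcanon (p : String × String) : String × String := if p.1 ≤ p.2 then p else (p.2, p.1)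

def gstep (g : PySem.Dict (String × String) ((String × String) × Bool)) (p : String × String) :
    PySem.Dict (String × String) ((String × String) × Bool) :=
  let key := if p.1 ≤ p.2 then p else (p.2, p.1)
  match PySem.Dict.get? g key with
  | none => PySem.Dict.insert g key (p, p.1 == p.2)
  | some fb => if fb.1 != p then PySem.Dict.insert g key (fb.1, true) else g

def fpr (d : List (String × String)) (k : String × String) : String × String :=
  (d.find? (fun q => pcanon q == k)).getD ("", "")

theorem prev_prev (p : String × String) : prev (prev p) = p := rfl

theorem pcanon_prev (p : String × String) : pcanon (prev p) = pcanon p := by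
  unfold pcanon prev
  by_cases h1 : p.1 ≤ p.2 <;> by_cases h2 : p.2 ≤ p.1
  · have : p.1 = p.2 := le_antisymm h1 h2
    simp only [h1, h2, if_pos]
    exact Prod.ext this.symm this
  · simp only [h1, h2, if_pos, if_neg, not_false_iff]
  · simp only [h1, h2, if_pos, if_neg, not_false_iff]
  · exact absurd (le_total p.1 p.2) (by simp [h1, h2])

theorem pcanon_eq_imp {q p : String × String} (h : pcanon q = pcanon p) : q = p ∨ q = prev p := by
  unfold pcanon prev at *
  by_cases hq : q.1 ≤ q.2 <;> by_cases hp : p.1 ≤ p.2 <;>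
    simp only [hq, hp, if_pos, if_neg, not_false_iff] at h
  · exact Or.inl h
  · exact Or.inr h
  · right
    have := congrArg (fun r : String × String => (r.2, r.1)) h
    have := this.symm
    simp only [Prod.ext_iff] at this ⊢
    exact ⟨this.1.symm, this.2.symm⟩
  · left
    have := congrArg (fun r : String × String => (r.2, r.1)) h
    have := this.symm
    simp only [Prod.ext_iff] at this ⊢
    exact ⟨this.1.symm, this.2.symm⟩

-- A's loop, run from arbitrary accumulators
theorem loopA_eq (d : List (String × String)) (rest : List (String × String))
    (c p : List (String × String)) :
    rest.foldl
      (fun st i =>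
        let a := i.1
        let b := i.2
        if d.contains (b, a) then
          (st.1, PySem.Set.add (PySem.Set.add st.2 (a, b)) (b, a))
        else
          (PySem.Set.add st.1 (a, b), st.2))
      (c, p)
    = (PySem.Set.update c (rest.filter (fun q => !(d.contains (q.2, q.1)))),
       PySem.Set.update p (rest.flatMap
         (fun q => if d.contains (q.2, q.1) then [q, (q.2, q.1)] else []))) := by
  induction rest generalizing c p with
  | nil => rfl
  | cons q rest ih =>
    simp only [List.foldl_cons, List.filter_cons, List.flatMap_cons]
    by_cases h : d.contains (q.2, q.1)
    · simp only [h, if_pos, Bool.not_true]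
      rw [ih]
      rfl
    · simp only [h, Bool.not_false, if_neg, Bool.false_eq_true, not_false_iff]
      rw [ih]
      rfl

-- B's second loop, run from arbitrary accumulators
theorem loopB_eq (V : List ((String × String) × Bool)) (c p : List (String × String)) :
    V.foldl
      (fun st fb =>
        if fb.2 then (st.1, PySem.Set.add (PySem.Set.add st.2 fb.1) (fb.1.2, fb.1.1))
        else (PySem.Set.add st.1 fb.1, st.2))
      (c, p)
    = (PySem.Set.update c ((V.filter (fun fb => !fb.2)).map (·.1)),
       PySem.Set.update p (V.flatMap (fun fb => if fb.2 then [fb.1, (fb.1.2, fb.1.1)] else []))) := by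
  induction V generalizing c p with
  | nil => rfl
  | cons fb V ih =>
    simp only [List.foldl_cons, List.filter_cons, List.flatMap_cons]
    by_cases h : fb.2
    · simp only [h, if_pos, Bool.not_true]
      rw [ih]
      rfl
    · simp only [h, Bool.not_false, if_neg, Bool.false_eq_true, not_false_iff]
      rw [ih]
      rfl

-- the grouping dict's lookup, characterised
theorem gstep_get? (u : List (String × String))
    (g : PySem.Dict (String × String) ((String × String) × Bool)) (k : String × String) :
    (u.foldl gstep g).get? k =
      match g.get? k with
      | some fb => some (fb.1, fb.2 || u.any (fun q => pcanon q == k && q != fb.1))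
      | none => (u.find? (fun q => pcanon q == k)).map
          (fun p => (p, (p.1 == p.2) || u.any (fun q => pcanon q == k && q != p))) := by
  induction u generalizing g with
  | nil =>
    cases hg : g.get? k <;> simp [hg]
  | cons p u ih =>
    simp only [List.foldl_cons]
    rw [ih]
    by_cases hk : k = pcanon p
    · subst hk
      show (match (gstep g p).get? (pcanon p) with
        | some fb => some (fb.1, fb.2 || u.any (fun q => pcanon q == pcanon p && q != fb.1))
        | none => (u.find? (fun q => pcanon q == pcanon p)).map
            (fun x => (x, (x.1 == x.2) || u.any (fun q => pcanon q == pcanon p && q != x)))) = _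
      unfold gstep
      have hkey : (if p.1 ≤ p.2 then p else (p.2, p.1)) = pcanon p := rfl
      rw [hkey]
      cases hg : g.get? (pcanon p) with
      | none =>
        simp only [hg, PySem.Dict.get?_insert_self]
        simp [List.any_cons]
      | some fb =>
        simp only [hg]
        by_cases hne : fb.1 != p
        · simp only [hne, if_pos, PySem.Dict.get?_insert_self]
          have hp : (p != fb.1) = true := by
            simpa [bne_iff_ne, ne_comm] using hne
          simp [List.any_cons, hp]
        · have hfb : fb.1 = p := by simpa [bne_iff_ne] using hne
          simp only [hne, if_neg, Bool.false_eq_true, not_false_iff, hg]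
          simp [List.any_cons, hfb]
    · -- k ≠ pcanon p : the step leaves key k alone, and p contributes nothing at key k
      have hbeq : (pcanon p == k) = false := by
        simp only [beq_eq_false_iff_ne, ne_eq]
        exact fun h => hk h.symm
      have hstep : (gstep g p).get? k = g.get? k := by
        unfold gstep
        have hkey : (if p.1 ≤ p.2 then p else (p.2, p.1)) = pcanon p := rfl
        rw [hkey]
        cases hg : g.get? (pcanon p) with
        | none => simp only [hg]; exact PySem.Dict.get?_insert_of_ne _ _ hk
        | some fb =>
          simp only [hg]
          by_cases hne : fb.1 != p
          · simp only [hne, if_pos]; exact PySem.Dict.get?_insert_of_ne _ _ hk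
          · simp only [hne, if_neg, Bool.false_eq_true, not_false_iff]
      rw [hstep]
      cases hg : g.get? k <;> simp [List.any_cons, hbeq]

theorem gstep_keys (u : List (String × String))
    (g : PySem.Dict (String × String) ((String × String) × Bool)) :
    (u.foldl gstep g).keys = PySem.Set.update g.keys (u.map pcanon) := by
  induction u generalizing g with
  | nil => rfl
  | cons p u ih =>
    simp only [List.foldl_cons, List.map_cons, PySem.Set.update_cons]
    rw [ih]
    congr 1
    show (gstep g p).keys = PySem.Set.add g.keys (pcanon p)
    unfold gstep
    have hkey : (if p.1 ≤ p.2 then p else (p.2, p.1)) = pcanon p := rfl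
    rw [hkey]
    cases hg : PySem.Dict.get? g (pcanon p) with
    | none =>
      simp only [hg]
      have hnc : (pcanon p) ∉ g.keys := (PySem.Dict.get?_eq_none_iff_not_mem_keys g _).mp hg
      rw [PySem.Dict.keys_insert_of_not_contains g _ (by
        simp [PySem.Dict.contains_eq_isSome_get?, hg])]
      rw [PySem.Set.add_of_not_mem hnc]
    | some fb =>
      simp only [hg]
      have hc : g.contains (pcanon p) = true := by
        simp [PySem.Dict.contains_eq_isSome_get?, hg]
      have hm : (pcanon p) ∈ g.keys := (PySem.Dict.contains_iff_mem_keys g _).mp hc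
      rw [PySem.Set.add_of_mem hm]
      by_cases hne : fb.1 != p
      · simp only [hne, if_pos]
        exact PySem.Dict.keys_insert_of_contains g _ hc
      · simp only [hne, if_neg, Bool.false_eq_true, not_false_iff]

-- the parallel-flag of a group equals "the reverse of its first pair occurs in d"
theorem flag_eq_contains (d : List (String × String)) {k p : String × String}
    (hf : d.find? (fun q => pcanon q == k) = some p) :
    ((p.1 == p.2) || d.any (fun q => pcanon q == k && q != p)) = d.contains (prev p) := by
  have hp : p ∈ d := List.mem_of_find?_eq_some hf
  have hcan : pcanon p = k := by simpa [beq_iff_eq] using List.find?_some hf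
  rw [Bool.eq_iff_iff]
  simp only [Bool.or_eq_true, beq_iff_eq, List.any_eq_true, Bool.and_eq_true, bne_iff_ne,
    List.contains_iff_mem]
  constructor
  · rintro (heq | ⟨q, hqd, hqk, hqp⟩)
    · have : prev p = p := Prod.ext heq.symm heq
      rw [this]; exact hp
    · rcases pcanon_eq_imp (hqk.trans hcan.symm) with h | h
      · exact absurd h hqp
      · rw [← h]; exact hqd
  · intro hrev
    by_cases heq : p.1 = p.2
    · exact Or.inl heq
    · refine Or.inr ⟨prev p, hrev, ?_, ?_⟩
      · rw [pcanon_prev, hcan]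
      · intro h
        exact heq (congrArg Prod.fst h).symm

theorem values_groups (d : List (String × String)) :
    (d.foldl gstep PySem.Dict.empty).values =
      (PySem.Set.ofList (d.map pcanon)).map
        (fun k => (fpr d k, d.contains (prev (fpr d k)))) := by
  have hkeys : (d.foldl gstep PySem.Dict.empty).keys = PySem.Set.ofList (d.map pcanon) := by
    rw [gstep_keys]
    simp [PySem.Dict.keys_empty, PySem.Set.update_nil_left]
  have hnd : (d.foldl gstep PySem.Dict.empty).keys.Nodup := by
    rw [hkeys]; exact PySem.Set.nodup_ofList _
  rw [PySem.Dict.values_eq_map_keys _ hnd (("", ""), false), hkeys]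
  apply List.map_congr_left
  intro k hk
  have hk' : k ∈ d.map pcanon := (PySem.Set.mem_ofList _ _).mp hk
  obtain ⟨q, hq, hqk⟩ := List.mem_map.mp hk'
  have hsome : (d.find? (fun q => pcanon q == k)).isSome := by
    rw [List.find?_isSome]
    exact ⟨q, hq, by simp [hqk]⟩
  obtain ⟨p, hf⟩ := Option.isSome_iff_exists.mp hsome
  have hget : (d.foldl gstep PySem.Dict.empty).get? k =
      some (p, (p.1 == p.2) || d.any (fun q => pcanon q == k && q != p)) := by
    rw [gstep_get?]
    simp [PySem.Dict.get?_empty, hf]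
  rw [PySem.Dict.getD_eq_get?_getD, hget]
  have hfpr : fpr d k = p := by unfold fpr; rw [hf]; rfl
  simp [hfpr, flag_eq_contains d hf]

-- first pair of q's group, when q is in d
theorem fpr_mem_canon {d : List (String × String)} {q : String × String} (hq : q ∈ d) :
    fpr d (pcanon q) ∈ d ∧ pcanon (fpr d (pcanon q)) = pcanon q := by
  have hsome : (d.find? (fun r => pcanon r == pcanon q)).isSome := by
    rw [List.find?_isSome]
    exact ⟨q, hq, by simp⟩
  obtain ⟨p, hf⟩ := Option.isSome_iff_exists.mp hsome
  have hfpr : fpr d (pcanon q) = p := by unfold fpr; rw [hf]; rfl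
  rw [hfpr]
  exact ⟨List.mem_of_find?_eq_some hf, by simpa [beq_iff_eq] using List.find?_some hf⟩

theorem fpr_eq_self_of_causal {d : List (String × String)} {q : String × String}
    (hq : q ∈ d) (hc : prev q ∉ d) : fpr d (pcanon q) = q := by
  obtain ⟨hmem, hcan⟩ := fpr_mem_canon hq
  rcases pcanon_eq_imp hcan with h | h
  · exact h
  · exact absurd (h ▸ hmem) hc

theorem contains_prev_fpr {d : List (String × String)} {q : String × String} (hq : q ∈ d) :
    d.contains (prev (fpr d (pcanon q))) = d.contains (prev q) := by
  obtain ⟨hmem, hcan⟩ := fpr_mem_canon hq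
  rcases pcanon_eq_imp hcan with h | h
  · rw [h]
  · rw [h, prev_prev]
    rw [Bool.eq_iff_iff]
    simp only [List.contains_iff_mem]
    exact ⟨fun _ => h ▸ hmem, fun _ => hq⟩

-- generic PySem.Set facts specialised to our pair type
theorem update_of_subset {α : Type} [BEq α] [LawfulBEq α] (s : PySem.Set α) (xs : List α)
    (h : ∀ x ∈ xs, x ∈ s) : PySem.Set.update s xs = s := by
  induction xs generalizing s with
  | nil => rfl
  | cons x xs ih =>
    rw [PySem.Set.update_cons, PySem.Set.add_of_mem (h x (by simp))]
    exact ih s (fun y hy => h y (by simp [hy]))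

theorem ofList_filter {α : Type} [BEq α] [LawfulBEq α] (xs : List α) (p : α → Bool) :
    PySem.Set.ofList (xs.filter p) = (PySem.Set.ofList xs).filter p := by
  induction xs using List.reverseRecOn with
  | nil => rfl
  | append_singleton ys y ih =>
    rw [List.filter_append, PySem.Set.ofList_append_singleton]
    by_cases hy : y ∈ ys
    · rw [PySem.Set.add_of_mem ((PySem.Set.mem_ofList _ _).mpr hy)]
      by_cases hp : p y
      · simp only [List.filter_cons, hp, if_pos, List.filter_nil]
        rw [PySem.Set.ofList_append_singleton,
          PySem.Set.add_of_mem ((PySem.Set.mem_ofList _ _).mpr (List.mem_filter.mpr ⟨hy, hp⟩))]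
        exact ih
      · simp only [List.filter_cons, hp, Bool.false_eq_true, if_neg, not_false_iff,
          List.filter_nil, List.append_nil]
        exact ih
    · rw [PySem.Set.add_of_not_mem (fun hc => hy ((PySem.Set.mem_ofList _ _).mp hc))]
      rw [List.filter_append]
      by_cases hp : p y
      · simp only [List.filter_cons, hp, if_pos, List.filter_nil]
        rw [PySem.Set.ofList_append_singleton,
          PySem.Set.add_of_not_mem (fun hc => hy (List.mem_filter.mp
            ((PySem.Set.mem_ofList _ _).mp hc)).1)]
        rw [ih]
      · simp only [List.filter_cons, hp, Bool.false_eq_true, if_neg, not_false_iff,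
          List.filter_nil, List.append_nil]
        exact ih

theorem ofList_map_inj {α β : Type} [BEq α] [LawfulBEq α] [BEq β] [LawfulBEq β]
    (xs : List α) (f : α → β) (hinj : ∀ a ∈ xs, ∀ b ∈ xs, f a = f b → a = b) :
    PySem.Set.ofList (xs.map f) = (PySem.Set.ofList xs).map f := by
  induction xs using List.reverseRecOn with
  | nil => rfl
  | append_singleton ys y ih =>
    have hinj' : ∀ a ∈ ys, ∀ b ∈ ys, f a = f b → a = b :=
      fun a ha b hb => hinj a (by simp [ha]) b (by simp [hb])
    rw [PySem.Set.ofList_append_singleton, List.map_append, List.map_singleton,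
      PySem.Set.ofList_append_singleton]
    by_cases hy : y ∈ ys
    · rw [PySem.Set.add_of_mem ((PySem.Set.mem_ofList _ _).mpr hy)]
      rw [PySem.Set.add_of_mem ((PySem.Set.mem_ofList _ _).mpr
        (List.mem_map.mpr ⟨y, hy, rfl⟩))]
      exact ih hinj'
    · rw [PySem.Set.add_of_not_mem (fun hc => hy ((PySem.Set.mem_ofList _ _).mp hc))]
      have hfy : f y ∉ ys.map f := by
        intro hc
        obtain ⟨b, hb, hfb⟩ := List.mem_map.mp hc
        exact hy (hinj b (by simp [hb]) y (by simp) hfb ▸ hb)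
      rw [PySem.Set.add_of_not_mem (fun hc => hfy ((PySem.Set.mem_ofList _ _).mp hc))]
      rw [ih hinj', List.map_append, List.map_singleton]

theorem ofList_flatMap_ofList {α β : Type} [BEq α] [LawfulBEq α] [BEq β] [LawfulBEq β]
    (ys : List α) (h : α → List β) :
    PySem.Set.ofList ((PySem.Set.ofList ys).flatMap h) = PySem.Set.ofList (ys.flatMap h) := by
  induction ys using List.reverseRecOn with
  | nil => rfl
  | append_singleton ys y ih =>
    rw [PySem.Set.ofList_append_singleton, List.flatMap_append, List.flatMap_singleton,
      PySem.Set.ofList_append]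
    by_cases hy : y ∈ ys
    · rw [PySem.Set.add_of_mem ((PySem.Set.mem_ofList _ _).mpr hy), ih]
      rw [update_of_subset]
      intro z hz
      rw [PySem.Set.mem_ofList]
      exact List.mem_flatMap.mpr ⟨y, hy, hz⟩
    · rw [PySem.Set.add_of_not_mem (fun hc => hy ((PySem.Set.mem_ofList _ _).mp hc))]
      rw [List.flatMap_append, List.flatMap_singleton, PySem.Set.ofList_append, ih]

theorem flatMap_if_filter {α β : Type} (xs : List α) (p : α → Bool) (f : α → List β) :
    xs.flatMap (fun x => if p x then f x else []) = (xs.filter p).flatMap f := by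
  induction xs with
  | nil => rfl
  | cons x xs ih =>
    simp only [List.flatMap_cons, List.filter_cons]
    by_cases h : p x <;> simp [h, ih]

theorem filter_split {α : Type} (p : α → Bool) :
    ∀ (l l1 : List α) (x : α) (l2 : List α), l.filter p = l1 ++ x :: l2 →
      ∃ m1 m2, l = m1 ++ x :: m2 ∧ m1.filter p = l1 := by
  intro l
  induction l with
  | nil => intro l1 x l2 h; simp at h
  | cons a t ih =>
    intro l1 x l2 h
    by_cases hp : p a
    · rw [List.filter_cons, if_pos hp] at h
      cases l1 with
      | nil =>
        simp at h
        exact ⟨[], t, by simp [h.1], by simp⟩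
      | cons b l1' =>
        simp at h
        obtain ⟨hab, ht⟩ := h
        obtain ⟨m1, m2, hl, hf⟩ := ih l1' x l2 ht
        exact ⟨a :: m1, m2, by simp [hl], by simp [hab ▸ hp, hab, hf]⟩
    · rw [List.filter_cons, if_neg (by simpa using hp)] at h
      obtain ⟨m1, m2, hl, hf⟩ := ih l1 x l2 h
      exact ⟨a :: m1, m2, by simp [hl], by simp [hp, hf]⟩

-- the crux: deduplicating the parallel stream may replace each pair by its group's first pair
theorem crux (F : (String × String) → (String × String)) :
    ∀ (l : List (String × String)) (s : PySem.Set (String × String)),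
    (∀ q ∈ l, F (pcanon q) = q ∨ F (pcanon q) = prev q) →
    (∀ l1 q l2, l = l1 ++ q :: l2 → F (pcanon q) = q ∨ (q ∈ s ∧ prev q ∈ s) ∨ F (pcanon q) ∈ l1) →
    PySem.Set.update s (l.flatMap (fun q => [q, prev q])) =
    PySem.Set.update s (l.flatMap (fun q => [F (pcanon q), prev (F (pcanon q))])) := by
  intro l
  induction l with
  | nil => intro s _ _; rfl
  | cons q t ih =>
    intro s hP1 hI
    have hq0 := hI [] q t rfl
    simp only [or_false, List.not_mem_nil] at hq0
    simp only [List.flatMap_cons, PySem.Set.update_append]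
    -- from F(pcanon q') = q and hP1, q' and prev q' lie in {q, prev q}
    have hgrp : ∀ q' ∈ t, F (pcanon q') = q → (q' = q ∨ q' = prev q) := by
      intro q' hq' hFq
      rcases hP1 q' (by simp [hq']) with h | h
      · exact Or.inl (h.symm.trans hFq)
      · right
        have : prev q' = q := h.symm.trans hFq
        rw [← this, prev_prev]
    rcases hq0 with ha | ⟨hqs, hps⟩
    · -- head is its group's first pair: the two blocks coincide
      rw [ha]
      apply ih
      · exact fun q' hq' => hP1 q' (by simp [hq'])
      · intro t1 q' t2 ht
        rcases hI (q :: t1) q' t2 (by rw [ht]; rfl) with h | h | h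
        · exact Or.inl h
        · refine Or.inr (Or.inl ⟨?_, ?_⟩)
          · exact (PySem.Set.mem_update _ _ _).mpr (Or.inl h.1)
          · exact (PySem.Set.mem_update _ _ _).mpr (Or.inl h.2)
        · rcases List.mem_cons.mp h with h | h
          · refine Or.inr (Or.inl ?_)
            rcases hgrp q' (by simp [ht]) h with he | he
            · constructor
              · exact (PySem.Set.mem_update _ _ _).mpr (Or.inr (by simp [he]))
              · exact (PySem.Set.mem_update _ _ _).mpr (Or.inr (by simp [he, prev]))
            · constructor
              · exact (PySem.Set.mem_update _ _ _).mpr (Or.inr (by simp [he]))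
              · exact (PySem.Set.mem_update _ _ _).mpr (Or.inr (by simp [he, prev_prev]))
          · exact Or.inr (Or.inr h)
    · -- head's group was already emitted: neither block adds anything
      have hF : F (pcanon q) = q ∨ F (pcanon q) = prev q := hP1 q (by simp)
      have h1 : PySem.Set.update s [q, prev q] = s :=
        update_of_subset s _ (by intro x hx; rcases List.mem_pair.mp hx with h | h <;> simp [h, hqs, hps])
      have h2 : PySem.Set.update s [F (pcanon q), prev (F (pcanon q))] = s := by
        apply update_of_subset s _
        intro x hx
        rcases List.mem_pair.mp hx with h | h <;> rcases hF with hf | hf <;>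
          simp [h, hf, prev_prev, hqs, hps]
      rw [h1, h2]
      apply ih
      · exact fun q' hq' => hP1 q' (by simp [hq'])
      · intro t1 q' t2 ht
        rcases hI (q :: t1) q' t2 (by rw [ht]; rfl) with h | h | h
        · exact Or.inl h
        · exact Or.inr (Or.inl h)
        · rcases List.mem_cons.mp h with h | h
          · refine Or.inr (Or.inl ?_)
            rcases hgrp q' (by simp [ht]) h with he | he
            · exact ⟨he ▸ hqs, he ▸ hps⟩
            · refine ⟨he ▸ hps, ?_⟩
              rw [he, prev_prev]; exact hqs
          · exact Or.inr (Or.inr h)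

-- ===== VERDICT (by name: the statement is the Claim_ definition above) =====
-- the second loop of B, applied to the characterised group values
theorem altB_eq (d : List (String × String)) :
    get_causality_parallel_alt d =
      (PySem.Dict.values (d.foldl gstep PySem.Dict.empty)).foldl
        (fun st fb =>
          if fb.2 then (st.1, PySem.Set.add (PySem.Set.add st.2 fb.1) (fb.1.2, fb.1.1))
          else (PySem.Set.add st.1 fb.1, st.2))
        (PySem.Set.empty, PySem.Set.empty) := rfl

-- pcanon is injective on the causal pairs of d
theorem pcanon_inj_causal (d : List (String × String)) :
    ∀ a ∈ d.filter (fun q => d.contains (prev q) == false),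
      ∀ b ∈ d.filter (fun q => d.contains (prev q) == false),
      pcanon a = pcanon b → a = b := by
  intro a ha b hb hab
  obtain ⟨had, hac⟩ := List.mem_filter.mp ha
  obtain ⟨hbd, hbc⟩ := List.mem_filter.mp hb
  rcases pcanon_eq_imp hab with h | h
  · exact h
  · exfalso
    have hmem : prev b ∈ d := h ▸ had
    rw [beq_iff_eq, Bool.eq_false_iff] at hbc
    exact hbc (by simpa [List.contains_iff_mem] using hmem)

-- the filtered canonical-key list is the canonical image of the correspondingly filtered pairs
theorem K_filter_eq (d : List (String × String)) (c : Bool) :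
    (PySem.Set.ofList (d.map pcanon)).filter (fun k => (d.contains (prev (fpr d k))) == c) =
      PySem.Set.ofList ((d.filter (fun q => (d.contains (prev q)) == c)).map pcanon) := by
  rw [← ofList_filter, List.filter_map]
  congr 1
  congr 1
  apply List.filter_congr
  intro q hq
  show (d.contains (prev (fpr d (pcanon q))) == c) = (d.contains (prev q) == c)
  rw [contains_prev_fpr hq]

-- first-occurrence property of fpr on a filtered split
theorem fpr_first (d : List (String × String)) (c : Bool) :
    ∀ (l1 : List (String × String)) (q : String × String) (l2 : List (String × String)),
      d.filter (fun r => (d.contains (prev r)) == c) = l1 ++ q :: l2 →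
      fpr d (pcanon q) = q ∨ fpr d (pcanon q) ∈ l1 := by
  intro l1 q l2 ht
  have hqLp : q ∈ d.filter (fun r => (d.contains (prev r)) == c) := by rw [ht]; simp
  obtain ⟨hqd, hqc⟩ := List.mem_filter.mp hqLp
  obtain ⟨m1, m2, hd, hm1⟩ := filter_split _ d l1 q l2 ht
  unfold fpr
  rw [hd, List.find?_append]
  cases hm : m1.find? (fun r => pcanon r == pcanon q) with
  | none =>
    left
    simp
  | some p0 =>
    right
    have hp0m : p0 ∈ m1 := List.mem_of_find?_eq_some hm
    have hp0c : pcanon p0 = pcanon q := by simpa [beq_iff_eq] using List.find?_some hm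
    have hp0cnd : (d.contains (prev p0)) = (d.contains (prev q)) := by
      rcases pcanon_eq_imp hp0c with h | h
      · rw [h]
      · rw [h, prev_prev, Bool.eq_iff_iff]
        simp only [List.contains_iff_mem]
        have hprevq : prev q ∈ d := by rw [← h]; rw [hd]; exact List.mem_append_left _ hp0m
        exact ⟨fun _ => hprevq, fun _ => hqd⟩
    rw [← hm1]
    simp only [Option.some_or, Option.getD_some]
    exact List.mem_filter.mpr ⟨hp0m, by rw [hp0cnd]; exact hqc⟩

-- ===== VERDICT (by name: the statement is the Claim_ definition above) =====
theorem get_causality_parallel_spec : Claim_equal_get_causality_parallel := by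
  intro d _
  show get_causality_parallel d = get_causality_parallel_alt d
  rw [altB_eq, values_groups]
  unfold get_causality_parallel
  rw [loopA_eq d d, loopB_eq]
  have hprev : ∀ q : String × String, (q.2, q.1) = prev q := fun q => rfl
  congr 1
  · -- causality component
    show PySem.Set.update PySem.Set.empty (d.filter (fun q => !(d.contains (q.2, q.1)))) = _
    rw [List.filter_map, List.map_map, PySem.Set.update_empty, PySem.Set.update_empty]
    have h1 : (d.filter (fun q => !(d.contains (q.2, q.1)))) =
        d.filter (fun q => (d.contains (prev q)) == false) := by
      apply List.filter_congr
      intro q _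
      show (!(d.contains (prev q))) = ((d.contains (prev q)) == false)
      cases d.contains (prev q) <;> rfl
    have hcomp1 : ((fun (fb : (String × String) × Bool) => !fb.2) ∘
        (fun k => (fpr d k, d.contains (prev (fpr d k))))) =
        (fun k => (d.contains (prev (fpr d k))) == false) := by
      funext k
      show (!(d.contains (prev (fpr d k)))) = ((d.contains (prev (fpr d k))) == false)
      cases d.contains (prev (fpr d k)) <;> rfl
    have hcomp2 : ((fun (x : (String × String) × Bool) => x.1) ∘
        (fun k => (fpr d k, d.contains (prev (fpr d k))))) = (fun k => fpr d k) := rfl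
    rw [h1, hcomp1, hcomp2, K_filter_eq d false]
    rw [ofList_map_inj _ _ (pcanon_inj_causal d), List.map_map]
    have hid : ∀ q ∈ PySem.Set.ofList (d.filter (fun q => (d.contains (prev q)) == false)),
        ((fun k => fpr d k) ∘ pcanon) q = q := by
      intro q hq
      have hq' := (PySem.Set.mem_ofList _ _).mp hq
      obtain ⟨hqd, hqc⟩ := List.mem_filter.mp hq'
      show fpr d (pcanon q) = q
      apply fpr_eq_self_of_causal hqd
      intro hc
      rw [beq_iff_eq, Bool.eq_false_iff] at hqc
      exact hqc (by simpa [List.contains_iff_mem] using hc)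
    rw [List.map_congr_left hid, List.map_id', PySem.Set.ofList_ofList]
  · -- parallel component
    show PySem.Set.update PySem.Set.empty
        (d.flatMap (fun q => if d.contains (q.2, q.1) then [q, (q.2, q.1)] else [])) = _
    rw [PySem.Set.update_empty, PySem.Set.update_empty, List.flatMap_map]
    have hA : (fun q : String × String => if d.contains (q.2, q.1) then [q, (q.2, q.1)] else
        ([] : List (String × String))) =
        (fun q => if (d.contains (prev q)) == true then [q, prev q] else []) := by
      funext q
      show (if d.contains (prev q) then [q, prev q] else []) = _
      cases hc : d.contains (prev q) <;> simp
    have hB : (fun (a : String × String) =>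
        if (fpr d a, d.contains (prev (fpr d a))).2
        then [(fpr d a, d.contains (prev (fpr d a))).1,
              ((fpr d a, d.contains (prev (fpr d a))).1.2, (fpr d a, d.contains (prev (fpr d a))).1.1)]
        else ([] : List (String × String))) =
        (fun a => if (d.contains (prev (fpr d a))) == true
          then [fpr d a, prev (fpr d a)] else []) := by
      funext a
      show (if d.contains (prev (fpr d a)) then _ else _) = _
      cases hc : d.contains (prev (fpr d a))
      · simp
      · simp
        rfl
    rw [hA, hB, flatMap_if_filter, flatMap_if_filter, K_filter_eq d true]
    rw [ofList_flatMap_ofList, List.flatMap_map]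
    rw [← PySem.Set.update_empty, ← PySem.Set.update_empty]
    apply crux (fun k => fpr d k) (d.filter (fun q => (d.contains (prev q)) == true)) PySem.Set.empty
    · intro q hq
      obtain ⟨hqd, _⟩ := List.mem_filter.mp hq
      obtain ⟨_, hcan⟩ := fpr_mem_canon hqd
      rcases pcanon_eq_imp hcan with h | h
      · exact Or.inl h
      · exact Or.inr h
    · intro l1 q l2 ht
      rcases fpr_first d true l1 q l2 ht with h | h
      · exact Or.inl h
      · exact Or.inr (Or.inr h)
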